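-- pv_equiv track=rewrite | github.com/feuras/uih_grav | 05_grav_disc_precision_rg_scaling.py | build_disc_coords
-- ===== SOURCE A (Python) =====
-- def build_disc_coords(R):
--     """Return lattice coordinates (x,y) inside a disc of radius R."""
--     coords = []
--     R2 = R * R
--     for x in range(-R, R + 1):
--         for y in range(-R, R + 1):
--             if x * x + y * y <= R2:
--                 coords.append((x, y))
--     return coords
-- ===== SOURCE B (Python) =====
-- def _isqrt(v):
--     # largest m with m*m <= v, for v >= 0, by binary search on [lo, hi)
--     lo, hi = 0, v + 1
--     while lo + 1 < hi:
--         mid = (lo + hi) // 2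
--         if mid * mid <= v:
--             lo = mid
--         else:
--             hi = mid
--     return lo
--
-- def build_disc_coords(R):
--     """Return lattice coordinates (x,y) inside a disc of radius R."""
--     coords = []
--     for x in range(-R, R + 1):
--         m = _isqrt(R * R - x * x)
--         coords.extend((x, y) for y in range(-m, m + 1))
--     return coords
-- ===== Notes on version B (the rewrite author's own statement) =====
-- stated objective: alternative
-- what changed: B replaces A's per-point membership test over the full (2R+1)x(2R+1) grid by computing, for each x, the exact y-extent m = isqrt(R*R - x*x) with a binary search and emitting the whole y-range [-m, m] directly.
import Mathlib
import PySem

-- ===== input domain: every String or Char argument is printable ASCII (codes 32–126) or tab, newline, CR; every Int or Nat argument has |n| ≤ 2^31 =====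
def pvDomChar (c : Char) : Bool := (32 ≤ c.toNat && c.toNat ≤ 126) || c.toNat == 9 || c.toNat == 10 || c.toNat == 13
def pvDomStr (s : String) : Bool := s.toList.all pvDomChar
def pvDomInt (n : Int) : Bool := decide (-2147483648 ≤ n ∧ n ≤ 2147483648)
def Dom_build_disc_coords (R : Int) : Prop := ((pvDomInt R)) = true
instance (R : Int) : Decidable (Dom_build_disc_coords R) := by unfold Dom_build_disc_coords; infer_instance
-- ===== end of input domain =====

-- B replaces A's per-point distance test by computing, for each x, the exact y-extent
-- via a binary-search integer square root and emitting that whole y-range (objective: alternative).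

-- ===== PORT A =====
-- Python's list.append is O(1) on a dynamic array; it is ported as Array.push
-- (with a final .toList), the same values in the same order.
def build_disc_coords (R : Int) : List (Int × Int) :=
  let R2 := R * R
  ((PySem.List.pyRange (-R) (R + 1) 1).foldl (fun coords x =>
    (PySem.List.pyRange (-R) (R + 1) 1).foldl (fun coords y =>
      if x * x + y * y ≤ R2 then coords.push (x, y) else coords) coords) #[]).toList

-- ===== PORT B =====
-- Source B's `while lo + 1 < hi` binary search, step for step; the Nat fuel only totalizes the
-- loop (it is the bracket width, which strictly shrinks every iteration).
def isqrtLoop (fuel : Nat) (v lo hi : Int) : Int :=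
  match fuel with
  | 0 => lo
  | fuel + 1 =>
    if lo + 1 < hi then
      let mid := PySem.Int.floordiv (lo + hi) 2
      if mid * mid ≤ v then isqrtLoop fuel v mid hi else isqrtLoop fuel v lo mid
    else lo

def pyIsqrt (v : Int) : Int := isqrtLoop (v + 1).toNat v 0 (v + 1)

-- coords.extend(gen) pushes each generated pair in order (dynamic-array semantics).
def build_disc_coords_alt (R : Int) : List (Int × Int) :=
  ((PySem.List.pyRange (-R) (R + 1) 1).foldl (fun coords x =>
    let m := pyIsqrt (R * R - x * x)
    (PySem.List.pyRange (-m) (m + 1) 1).foldl (fun coords y => coords.push (x, y)) coords) #[]).toList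

-- ===== PRECONDITION & SPEC =====
def Spec_build_disc_coords (R : Int) (out : List (Int × Int)) : Prop := out = build_disc_coords_alt R
instance (R : Int) (out : List (Int × Int)) : Decidable (Spec_build_disc_coords R out) := by unfold Spec_build_disc_coords; infer_instance

-- ===== CLAIM (what is proved, stated in full; the proofs are below) =====
def Claim_equal_build_disc_coords : Prop := ∀ (R : Int), Dom_build_disc_coords R → Spec_build_disc_coords R (build_disc_coords R)

-- ===== LEMMAS AND PROOFS =====

-- The binary search maintains lo*lo ≤ v < hi*hi and returns the floor square root
-- (any fuel ≥ the bracket width suffices).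
theorem isqrtLoop_spec (fuel : Nat) (v lo hi : Int) (h1 : 0 ≤ lo) (h2 : lo * lo ≤ v)
    (h3 : v < hi * hi) (h4 : lo < hi) (hf : (hi - lo).toNat ≤ fuel) :
    0 ≤ isqrtLoop fuel v lo hi ∧ isqrtLoop fuel v lo hi * isqrtLoop fuel v lo hi ≤ v ∧
      v < (isqrtLoop fuel v lo hi + 1) * (isqrtLoop fuel v lo hi + 1) := by
  induction fuel generalizing lo hi with
  | zero => omega
  | succ fuel ih =>
    rw [isqrtLoop]
    by_cases hlt : lo + 1 < hi
    · rw [if_pos hlt]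
      have hb := PySem.Int.floordiv_eq_ediv_of_pos (a := lo + hi) (b := 2) (by omega)
      set mid := PySem.Int.floordiv (lo + hi) 2 with hm
      have hmid1 : lo < mid := by omega
      have hmid2 : mid < hi := by omega
      by_cases hle : mid * mid ≤ v
      · rw [if_pos hle]
        exact ih mid hi (by omega) hle h3 hmid2 (by omega)
      · rw [if_neg hle]
        exact ih lo mid h1 h2 (by omega) hmid1 (by omega)
    · rw [if_neg hlt]
      have hhi : hi = lo + 1 := by omega
      subst hhi
      exact ⟨h1, h2, h3⟩

theorem pyIsqrt_spec (v : Int) (hv : 0 ≤ v) :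
    0 ≤ pyIsqrt v ∧ pyIsqrt v * pyIsqrt v ≤ v ∧ v < (pyIsqrt v + 1) * (pyIsqrt v + 1) := by
  have := isqrtLoop_spec (v + 1).toNat v 0 (v + 1) le_rfl (by simpa using hv) (by nlinarith) (by omega) (by omega)
  simpa [pyIsqrt] using this

-- A's inner loop pushes (x,y) when the test holds: on .toList it is filter-then-map.
theorem foldl_inner (x R2 : Int) (l : List Int) (acc : Array (Int × Int)) :
    (l.foldl (fun coords y => if x * x + y * y ≤ R2 then coords.push (x, y) else coords) acc).toList =
      acc.toList ++ (l.filter (fun y => decide (x * x + y * y ≤ R2))).map (fun y => (x, y)) := by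
  induction l generalizing acc with
  | nil => simp
  | cons y t ih =>
    simp only [List.foldl_cons, List.filter_cons]
    by_cases h : x * x + y * y ≤ R2
    · simp [h, ih]
    · simp [h, ih]

-- B's inner loop pushes every y of the range: on .toList it is the mapped range.
theorem foldl_inner_alt (x : Int) (l : List Int) (acc : Array (Int × Int)) :
    (l.foldl (fun coords y => Array.push coords (x, y)) acc).toList =
      acc.toList ++ l.map (fun y => (x, y)) := by
  induction l generalizing acc with
  | nil => simp
  | cons y t _ => simp

theorem filter_range_eq (R x : Int) (hx1 : -R ≤ x) (hx2 : x ≤ R) :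
    (PySem.List.pyRange (-R) (R + 1) 1).filter (fun y => decide (x * x + y * y ≤ R * R)) =
      PySem.List.pyRange (-(pyIsqrt (R * R - x * x))) (pyIsqrt (R * R - x * x) + 1) 1 := by
  have hR : 0 ≤ R := by omega
  have hv : 0 ≤ R * R - x * x := by nlinarith
  obtain ⟨hm0, hm1, hm2⟩ := pyIsqrt_spec (R * R - x * x) hv
  set m := pyIsqrt (R * R - x * x) with hmdef
  have hmR : m ≤ R := by nlinarith
  rw [PySem.List.pyRange_one_append (-R) (-m) (R + 1) (by omega) (by omega),
      PySem.List.pyRange_one_append (-m) (m + 1) (R + 1) (by omega) (by omega),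
      List.filter_append, List.filter_append]
  have left : (PySem.List.pyRange (-R) (-m) 1).filter
      (fun y => decide (x * x + y * y ≤ R * R)) = [] := by
    rw [List.filter_eq_nil_iff]
    intro y hy
    rw [PySem.List.mem_pyRange_one] at hy
    have : y ≤ -m - 1 := by omega
    simp only [decide_eq_true_eq]
    nlinarith
  have mid : (PySem.List.pyRange (-m) (m + 1) 1).filter
      (fun y => decide (x * x + y * y ≤ R * R)) = PySem.List.pyRange (-m) (m + 1) 1 := by
    rw [List.filter_eq_self]
    intro y hy
    rw [PySem.List.mem_pyRange_one] at hy
    simp only [decide_eq_true_eq]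
    nlinarith
  have right : (PySem.List.pyRange (m + 1) (R + 1) 1).filter
      (fun y => decide (x * x + y * y ≤ R * R)) = [] := by
    rw [List.filter_eq_nil_iff]
    intro y hy
    rw [PySem.List.mem_pyRange_one] at hy
    simp only [decide_eq_true_eq]
    nlinarith
  rw [left, mid, right]
  simp

-- Outer loops in lockstep: arrays with equal contents stay equal per x.
theorem outer_eq (R : Int) (xs : List Int) (hxs : ∀ x ∈ xs, -R ≤ x ∧ x ≤ R) :
    ∀ (aA aB : Array (Int × Int)), aA.toList = aB.toList →
    (xs.foldl (fun coords x =>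
        (PySem.List.pyRange (-R) (R + 1) 1).foldl (fun coords y =>
          if x * x + y * y ≤ R * R then coords.push (x, y) else coords) coords) aA).toList =
    (xs.foldl (fun coords x =>
        let m := pyIsqrt (R * R - x * x)
        (PySem.List.pyRange (-m) (m + 1) 1).foldl (fun coords y => coords.push (x, y)) coords) aB).toList := by
  induction xs with
  | nil => intro aA aB h; simpa using h
  | cons x t ih =>
    intro aA aB h
    simp only [List.foldl_cons]
    apply ih (fun z hz => hxs z (List.mem_cons_of_mem _ hz))
    rw [foldl_inner, foldl_inner_alt, h,
        filter_range_eq R x (hxs x (List.mem_cons_self)).1 (hxs x (List.mem_cons_self)).2]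

-- ===== VERDICT (by name: the statement is the Claim_ definition above) =====
theorem build_disc_coords_spec : Claim_equal_build_disc_coords := by
  intro R _
  unfold Spec_build_disc_coords build_disc_coords build_disc_coords_alt
  exact outer_eq R _ (fun x hx => by rw [PySem.List.mem_pyRange_one] at hx; omega) #[] #[] rfl
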